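-- pv_equiv track=rewrite | github.com/Kevincho26/anime_music_collection | tools/normalize_iframes_cleanup_and_youtube.py | collapse_ws_outside_quotes
-- ===== SOURCE A (Python) =====
-- def collapse_ws_outside_quotes(s: str) -> str:
--     """Colapsa whitespace fuera de comillas para dejar el <iframe ...> en una sola línea."""
--     out = []
--     in_quote = None
--     prev_space = False
--
--     for ch in s:
--         if in_quote:
--             out.append(ch)
--             if ch == in_quote:
--                 in_quote = None
--             continue
--
--         if ch in ('"', "'"):
--             out.append(ch)
--             in_quote = ch
--             prev_space = False
--             continue
--
--         if ch.isspace():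
--             if not prev_space:
--                 out.append(" ")
--                 prev_space = True
--             continue
--
--         out.append(ch)
--         prev_space = False
--
--     return "".join(out).strip()
-- ===== SOURCE B (Python) =====
-- def collapse_ws_outside_quotes(s: str) -> str:
--     """Segment-based rewrite: split into quoted spans (copied verbatim) and
--     unquoted runs (whitespace runs collapsed to one space), then strip."""
--     parts = []
--     i = 0
--     n = len(s)
--     while i < n:
--         ch = s[i]
--         if ch in '"\'':
--             j = s.find(ch, i + 1)
--             if j == -1:
--                 parts.append(s[i:])
--                 i = n
--             else:
--                 parts.append(s[i:j + 1])
--                 i = j + 1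
--         else:
--             j = i
--             while j < n and s[j] not in '"\'':
--                 j += 1
--             parts.append(_collapse_run(s[i:j]))
--             i = j
--     return ''.join(parts).strip()
--
--
-- def _collapse_run(seg: str) -> str:
--     out = []
--     i = 0
--     n = len(seg)
--     while i < n:
--         if seg[i].isspace():
--             out.append(' ')
--             while i < n and seg[i].isspace():
--                 i += 1
--         else:
--             out.append(seg[i])
--             i += 1
--     return ''.join(out)
-- ===== Notes on version B (the rewrite author's own statement) =====
-- stated objective: alternative
-- what changed: Replaces A's single char-by-char state machine (in_quote/prev_space flags) with a segment decomposition: quoted spans are located with str.find and copied verbatim as slices, and each maximal unquoted run is whitespace-collapsed independently by a run-skipping helper.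
import Mathlib
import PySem

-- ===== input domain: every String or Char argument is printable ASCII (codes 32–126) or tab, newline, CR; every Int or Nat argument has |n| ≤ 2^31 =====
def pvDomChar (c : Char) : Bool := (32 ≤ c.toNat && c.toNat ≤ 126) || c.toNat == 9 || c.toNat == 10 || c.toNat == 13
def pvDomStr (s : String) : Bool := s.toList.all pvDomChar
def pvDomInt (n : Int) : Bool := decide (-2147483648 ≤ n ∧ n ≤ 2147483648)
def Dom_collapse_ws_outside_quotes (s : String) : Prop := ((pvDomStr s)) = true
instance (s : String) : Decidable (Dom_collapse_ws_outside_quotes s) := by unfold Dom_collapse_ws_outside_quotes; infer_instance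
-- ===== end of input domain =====

-- B replaces A's one-pass flag machine by a segment decomposition (quoted spans copied
-- verbatim, unquoted runs collapsed independently); alternative structure, same cost.

-- ===== PORT A =====
-- A's loop state: (out, in_quote, prev_space)
def aStep (st : List Char × Option Char × Bool) (ch : Char) : List Char × Option Char × Bool :=
  match st with
  | (out, some q, ps) =>
      -- inside a quote: copy, close on matching quote
      if ch = q then (out ++ [ch], none, ps) else (out ++ [ch], some q, ps)
  | (out, none, ps) =>
      if ch = '"' ∨ ch = '\'' then (out ++ [ch], some ch, false)
      else if PySem.Chars.isspace ch then
        (if ps then out else out ++ [' '], none, true)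
      else (out ++ [ch], none, false)

def collapse_ws_outside_quotes (s : String) : String :=
  let st := s.toList.foldl aStep ([], none, false)
  PySem.Str.strip (String.mk st.1)

-- ===== PORT B =====
def bIsQuote (c : Char) : Bool := c = '"' || c = '\''

-- _collapse_run: each maximal whitespace run becomes one space
def bCollapseRun : List Char → List Char
  | [] => []
  | c :: rest =>
      if PySem.Chars.isspace c then
        ' ' :: bCollapseRun (rest.dropWhile PySem.Chars.isspace)
      else c :: bCollapseRun rest
termination_by l => l.length
decreasing_by
  · exact Nat.lt_succ_of_le (List.length_dropWhile_le _ _)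
  · simp

-- the while-loop over segments: quoted span via find (takeWhile/dropWhile), else unquoted run
def bGo : List Char → List Char
  | [] => []
  | c :: rest =>
      if bIsQuote c then
        match h : rest.dropWhile (fun x => x ≠ c) with
        | [] => c :: rest                      -- unclosed quote: copy remainder verbatim
        | _ :: tail => c :: rest.takeWhile (fun x => x ≠ c) ++ c :: bGo tail
      else
        bCollapseRun (c :: rest.takeWhile (fun x => !bIsQuote x))
          ++ bGo (rest.dropWhile (fun x => !bIsQuote x))
termination_by l => l.length
decreasing_by
  · have h1 : (rest.dropWhile (fun x => x ≠ c)).length ≤ rest.length :=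
      List.length_dropWhile_le _ _
    rw [h] at h1
    simp at h1 ⊢
    omega
  · exact Nat.lt_succ_of_le (List.length_dropWhile_le _ _)

def collapse_ws_outside_quotes_alt (s : String) : String :=
  PySem.Str.strip (String.mk (bGo s.toList))

-- ===== PRECONDITION & SPEC =====
def Spec_collapse_ws_outside_quotes (s : String) (out : String) : Prop := out = collapse_ws_outside_quotes_alt s
instance (s : String) (out : String) : Decidable (Spec_collapse_ws_outside_quotes s out) := by unfold Spec_collapse_ws_outside_quotes; infer_instance

-- ===== CLAIM (what is proved, stated in full; the proofs are below) =====
def Claim_equal_collapse_ws_outside_quotes : Prop := ∀ (s : String), Dom_collapse_ws_outside_quotes s → Spec_collapse_ws_outside_quotes s (collapse_ws_outside_quotes s)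

-- ===== LEMMAS AND PROOFS =====

-- quote characters are not whitespace
theorem quote_not_space (c : Char) (h : bIsQuote c = true) : PySem.Chars.isspace c = false := by
  simp [bIsQuote] at h
  rcases h with h | h <;> subst h <;> decide

-- when the incoming char is not whitespace, aStep (in no-quote state) ignores prev_space
theorem aStep_nonspace (c : Char) (h : PySem.Chars.isspace c = false) (out : List Char)
    (ps : Bool) : aStep (out, none, ps) c = aStep (out, none, false) c := by
  simp [aStep, h]

theorem foldl_nonspace (c : Char) (h : PySem.Chars.isspace c = false) (out : List Char)
    (ps : Bool) (l : List Char) :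
    List.foldl aStep (out, none, ps) (c :: l) = List.foldl aStep (out, none, false) (c :: l) := by
  simp only [List.foldl_cons, aStep_nonspace c h out ps]

-- with prev_space set, a run of (non-quote) whitespace is skipped entirely
theorem L_skip (ws : List Char) (hws : ∀ x ∈ ws, PySem.Chars.isspace x = true)
    (r : List Char) (out : List Char) :
    List.foldl aStep (out, none, true) (ws ++ r) = List.foldl aStep (out, none, true) r := by
  induction ws with
  | nil => simp
  | cons c ws ih =>
    have hc : PySem.Chars.isspace c = true := hws c (by simp)
    have hq : ¬ (c = '"' ∨ c = '\'') := by
      rintro (h | h) <;> subst h <;> exact absurd hc (by decide)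
    simp only [List.cons_append, List.foldl_cons, aStep, hq, hc, if_pos]
    exact ih (fun x hx => hws x (by simp [hx]))

-- inside a quote: copy until the matching quote (or to the end), then resume
theorem L_quote (l : List Char) (q : Char) : ∀ (acc : List Char) (ps : Bool),
    List.foldl aStep (acc, some q, ps) l =
      (match l.dropWhile (fun x => x ≠ q) with
       | [] => (acc ++ l, some q, ps)
       | _ :: tail =>
           List.foldl aStep ((acc ++ l.takeWhile (fun x => x ≠ q)) ++ [q], none, ps) tail) := by
  induction l with
  | nil => intro acc ps; simp
  | cons c l ih =>
    intro acc ps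
    by_cases hc : c = q
    · subst hc
      simp [aStep, List.dropWhile, List.takeWhile]
    · have h1 : List.dropWhile (fun x => x ≠ q) (c :: l) = List.dropWhile (fun x => x ≠ q) l := by
        simp [List.dropWhile, hc]
      have h2 : List.takeWhile (fun x => x ≠ q) (c :: l) = c :: List.takeWhile (fun x => x ≠ q) l := by
        simp [List.takeWhile, hc]
      rw [h1, h2]
      have hstep : aStep (acc, some q, ps) c = (acc ++ [c], some q, ps) := by
        simp [aStep, hc]
      rw [List.foldl_cons, hstep, ih (acc ++ [c]) ps]
      cases List.dropWhile (fun x => x ≠ q) l with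
      | nil => simp
      | cons d tail => simp

-- an unquoted run: A (starting with prev_space = false) emits exactly bCollapseRun of it
theorem L_run : ∀ (n : Nat) (seg : List Char), seg.length ≤ n →
    (∀ x ∈ seg, bIsQuote x = false) → ∀ (acc rest : List Char),
    ∃ ps', List.foldl aStep (acc, none, false) (seg ++ rest) =
      List.foldl aStep (acc ++ bCollapseRun seg, none, ps') rest := by
  intro n
  induction n with
  | zero =>
    intro seg hlen _ acc rest
    have : seg = [] := List.eq_nil_of_length_eq_zero (Nat.le_zero.mp hlen)
    subst this
    exact ⟨false, by simp [bCollapseRun]⟩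
  | succ n ih =>
    intro seg hlen hq acc rest
    cases seg with
    | nil => exact ⟨false, by simp [bCollapseRun]⟩
    | cons c s2 =>
      have hqc : bIsQuote c = false := hq c (by simp)
      have hqc' : ¬ (c = '"' ∨ c = '\'') := by
        simp [bIsQuote] at hqc; rintro (h | h) <;> [exact hqc.1 h; exact hqc.2 h]
      by_cases hsp : PySem.Chars.isspace c = true
      · -- whitespace head: one space emitted, then the run is skipped
        have hstep : aStep (acc, none, false) c = (acc ++ [' '], none, true) := by
          simp [aStep, hqc', hsp]
        have hsplit : s2 = s2.takeWhile PySem.Chars.isspace ++ s2.dropWhile PySem.Chars.isspace :=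
          (List.takeWhile_append_dropWhile).symm
        have hskip := L_skip (s2.takeWhile PySem.Chars.isspace)
          (fun x hx => List.mem_takeWhile_imp hx)
          (s2.dropWhile PySem.Chars.isspace ++ rest) (acc ++ [' '])
        have hfold : List.foldl aStep (acc, none, false) ((c :: s2) ++ rest) =
            List.foldl aStep (acc ++ [' '], none, true)
              (s2.dropWhile PySem.Chars.isspace ++ rest) := by
          rw [List.cons_append, List.foldl_cons, hstep]
          conv_lhs => rw [hsplit]
          rw [List.append_assoc]
          exact hskip
        have hcoll : bCollapseRun (c :: s2) =
            ' ' :: bCollapseRun (s2.dropWhile PySem.Chars.isspace) := by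
          rw [bCollapseRun]; simp [hsp]
        cases h3 : s2.dropWhile PySem.Chars.isspace with
        | nil =>
          refine ⟨true, ?_⟩
          rw [hfold, h3, hcoll, h3]
          simp [bCollapseRun]
        | cons d t =>
          have hd : PySem.Chars.isspace d = false := by
            have := List.head_dropWhile_not PySem.Chars.isspace (l := s2) (by simp [h3])
            simpa [h3] using this
          have hdt_sub : ∀ x ∈ d :: t, bIsQuote x = false := by
            intro x hx
            apply hq
            have : x ∈ s2.dropWhile PySem.Chars.isspace := by rw [h3]; exact hx
            exact List.mem_cons_of_mem c ((List.dropWhile_sublist _).subset this)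
          have hdt_len : (d :: t).length ≤ n := by
            have h4 : (s2.dropWhile PySem.Chars.isspace).length ≤ s2.length :=
              List.length_dropWhile_le _ _
            rw [h3] at h4
            simp at hlen
            simpa using Nat.le_trans h4 hlen
          obtain ⟨ps', hps'⟩ := ih (d :: t) hdt_len hdt_sub (acc ++ [' ']) rest
          refine ⟨ps', ?_⟩
          rw [List.cons_append] at hps'
          rw [hfold, h3, List.cons_append, foldl_nonspace d hd _ true, hps', hcoll, h3]
          simp
      · -- non-space head: copied through
        have hsp' : PySem.Chars.isspace c = false := by simpa using hsp
        have hstep : aStep (acc, none, false) c = (acc ++ [c], none, false) := by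
          simp [aStep, hqc', hsp']
        have hs2_sub : ∀ x ∈ s2, bIsQuote x = false := fun x hx => hq x (by simp [hx])
        have hs2_len : s2.length ≤ n := by simpa using hlen
        obtain ⟨ps', hps'⟩ := ih s2 hs2_len hs2_sub (acc ++ [c]) rest
        refine ⟨ps', ?_⟩
        rw [List.cons_append, List.foldl_cons, hstep, hps']
        rw [bCollapseRun]
        simp [hsp']

theorem bGo_quote_nil (c : Char) (rest : List Char) (hq : bIsQuote c = true)
    (h : rest.dropWhile (fun x => x ≠ c) = []) : bGo (c :: rest) = c :: rest := by
  rw [bGo, if_pos hq]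
  split
  · rfl
  · next d tail heq => rw [h] at heq; simp at heq

theorem bGo_quote_cons (c d : Char) (rest tail : List Char) (hq : bIsQuote c = true)
    (h : rest.dropWhile (fun x => x ≠ c) = d :: tail) :
    bGo (c :: rest) = c :: rest.takeWhile (fun x => x ≠ c) ++ c :: bGo tail := by
  rw [bGo, if_pos hq]
  split
  · next heq => rw [h] at heq; simp at heq
  · next d' tail' heq => rw [h] at heq; cases heq; rfl

theorem bGo_run (c : Char) (rest : List Char) (hq : bIsQuote c = false) :
    bGo (c :: rest) = bCollapseRun (c :: rest.takeWhile (fun x => !bIsQuote x))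
      ++ bGo (rest.dropWhile (fun x => !bIsQuote x)) := by
  rw [bGo, if_neg (by simp [hq])]

theorem main_aux : ∀ (n : Nat) (l : List Char), l.length ≤ n → ∀ (acc : List Char),
    (l.foldl aStep (acc, none, false)).1 = acc ++ bGo l := by
  intro n
  induction n with
  | zero =>
    intro l hlen acc
    have : l = [] := List.eq_nil_of_length_eq_zero (Nat.le_zero.mp hlen)
    subst this; simp [bGo]
  | succ n ih =>
    intro l hlen acc
    cases l with
    | nil => simp [bGo]
    | cons c rest =>
      by_cases hq : bIsQuote c = true
      · -- quoted span
        have hq' : c = '"' ∨ c = '\'' := by simpa [bIsQuote] using hq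
        have hstep : aStep (acc, none, false) c = (acc ++ [c], some c, false) := by
          simp [aStep, hq']
        rw [List.foldl_cons, hstep, L_quote rest c (acc ++ [c]) false]
        cases h : rest.dropWhile (fun x => x ≠ c) with
        | nil =>
          rw [bGo_quote_nil c rest hq h]
          simp
        | cons d tail =>
          have htail_len : tail.length ≤ n := by
            have h4 : (rest.dropWhile (fun x => x ≠ c)).length ≤ rest.length :=
              List.length_dropWhile_le _ _
            rw [h] at h4
            simp at h4 hlen
            omega
          rw [ih tail htail_len, bGo_quote_cons c d rest tail hq h]
          simp
      · -- unquoted run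
        have hqf : bIsQuote c = false := by simpa using hq
        have hseg : ∀ x ∈ c :: rest.takeWhile (fun x => !bIsQuote x), bIsQuote x = false := by
          intro x hx
          rcases List.mem_cons.mp hx with h | h
          · subst h; exact hqf
          · simpa using List.mem_takeWhile_imp h
        have hsplit : c :: rest = (c :: rest.takeWhile (fun x => !bIsQuote x)) ++
            rest.dropWhile (fun x => !bIsQuote x) := by
          simp [List.takeWhile_append_dropWhile]
        obtain ⟨ps', hps'⟩ := L_run (n + 1) (c :: rest.takeWhile (fun x => !bIsQuote x))
          (by simpa using Nat.succ_le_succ (Nat.le_trans (List.takeWhile_sublist _).length_le (by simpa using hlen)))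
          hseg acc (rest.dropWhile (fun x => !bIsQuote x))
        have hfold : List.foldl aStep (acc, none, false) (c :: rest) =
            List.foldl aStep (acc ++ bCollapseRun (c :: rest.takeWhile (fun x => !bIsQuote x)),
              none, ps') (rest.dropWhile (fun x => !bIsQuote x)) := by
          conv_lhs => rw [hsplit]
          exact hps'
        rw [hfold]
        cases h3 : rest.dropWhile (fun x => !bIsQuote x) with
        | nil =>
          rw [bGo_run c rest hqf, h3]
          simp [bGo]
        | cons d t =>
          have hd : bIsQuote d = true := by
            have := List.head_dropWhile_not (fun x => !bIsQuote x) (l := rest) (by simp [h3])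
            simpa [h3] using this
          have hd' : PySem.Chars.isspace d = false := quote_not_space d hd
          have hdt_len : (d :: t).length ≤ n := by
            have h4 : (rest.dropWhile (fun x => !bIsQuote x)).length ≤ rest.length :=
              List.length_dropWhile_le _ _
            rw [h3] at h4
            simp at hlen
            simpa using Nat.le_trans h4 hlen
          rw [foldl_nonspace d hd' _ ps', ih (d :: t) hdt_len, bGo_run c rest hqf, h3]
          simp

theorem main_fold (l : List Char) : ∀ acc, (l.foldl aStep (acc, none, false)).1 = acc ++ bGo l :=
  fun acc => main_aux l.length l (Nat.le_refl _) acc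

-- ===== VERDICT (by name: the statement is the Claim_ definition above) =====
theorem collapse_ws_outside_quotes_spec : Claim_equal_collapse_ws_outside_quotes := by
  intro s _
  unfold Spec_collapse_ws_outside_quotes collapse_ws_outside_quotes collapse_ws_outside_quotes_alt
  simp [main_fold]
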